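-- pv_equiv track=rewrite | github.com/AgnesBi/Hurricane_Analysis | hurricane_analysis.py | convert_to_mortality_scale
-- ===== SOURCE A (Python) =====
-- def convert_to_mortality_scale(lst):
--     scales = []
--     for i in lst:
--         if not i > 0:
--             scales.append(0)
--         elif not i > 100:
--             scales.append(1)
--         elif not i > 500:
--             scales.append(2)
--         elif not i > 1000:
--             scales.append(3)
--         elif not i > 10000:
--             scales.append(4)
--         else:
--             scales.append(5)
--     return scales
-- ===== SOURCE B (Python) =====
-- import bisect
--
-- _THRESHOLDS = [0, 100, 500, 1000, 10000]
--
-- def convert_to_mortality_scale(lst):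
--     return [bisect.bisect_left(_THRESHOLDS, i) for i in lst]
-- ===== Notes on version B (the rewrite author's own statement) =====
-- stated objective: idiomatic
-- what changed: Replaced the if/elif threshold ladder with a binary search (bisect_left) over a constant sorted threshold table, mapping each value to its bucket index.
import Mathlib
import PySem

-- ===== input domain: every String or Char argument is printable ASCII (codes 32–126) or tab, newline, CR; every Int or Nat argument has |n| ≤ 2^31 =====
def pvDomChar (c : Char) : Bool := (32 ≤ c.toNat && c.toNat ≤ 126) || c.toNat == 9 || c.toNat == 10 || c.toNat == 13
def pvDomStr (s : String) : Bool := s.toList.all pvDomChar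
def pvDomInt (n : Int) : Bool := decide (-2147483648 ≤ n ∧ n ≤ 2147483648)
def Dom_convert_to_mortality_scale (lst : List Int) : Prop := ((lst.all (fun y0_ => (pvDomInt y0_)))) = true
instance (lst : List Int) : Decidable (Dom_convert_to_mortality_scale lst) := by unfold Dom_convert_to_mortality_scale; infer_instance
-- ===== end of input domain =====

-- B replaces A's if/elif threshold ladder with a binary search (bisect_left) over a constant sorted threshold table (idiomatic).


-- ===== PORT A =====
-- literal transliteration of A's loop with its if/elif ladder, accumulating `scales`
def convert_to_mortality_scale (lst : List Int) : List Int :=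
  (lst.foldl (fun scales i =>
    if ¬ i > 0 then scales ++ [0]
    else if ¬ i > 100 then scales ++ [1]
    else if ¬ i > 500 then scales ++ [2]
    else if ¬ i > 1000 then scales ++ [3]
    else if ¬ i > 10000 then scales ++ [4]
    else scales ++ [5]) [])

-- ===== PORT B =====
-- bisect.bisect_left(a, x): binary search on [lo, hi), returning the leftmost insertion point
def pvBisectLeftGo (a : List Int) (x : Int) (lo hi : Nat) : Nat :=
  if h : lo < hi then
    let mid := (lo + hi) / 2
    if a.getD mid 0 < x then pvBisectLeftGo a x (mid + 1) hi
    else pvBisectLeftGo a x lo mid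
  else lo
termination_by hi - lo
decreasing_by all_goals omega

def pvBisectLeft (a : List Int) (x : Int) : Nat := pvBisectLeftGo a x 0 a.length

def pvThresholds : List Int := [0, 100, 500, 1000, 10000]

def convert_to_mortality_scale_alt (lst : List Int) : List Int :=
  lst.map (fun i => (pvBisectLeft pvThresholds i : Int))

-- ===== PRECONDITION & SPEC =====
def Spec_convert_to_mortality_scale (lst : List Int) (out : List Int) : Prop := out = convert_to_mortality_scale_alt lst
instance (lst : List Int) (out : List Int) : Decidable (Spec_convert_to_mortality_scale lst out) := by unfold Spec_convert_to_mortality_scale; infer_instance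

-- ===== CLAIM (what is proved, stated in full; the proofs are below) =====
def Claim_equal_convert_to_mortality_scale : Prop := ∀ (lst : List Int), Dom_convert_to_mortality_scale lst → Spec_convert_to_mortality_scale lst (convert_to_mortality_scale lst)

-- ===== LEMMAS AND PROOFS =====

-- the bucket value A assigns to one element
def pvBucket (i : Int) : Int :=
  if ¬ i > 0 then 0 else if ¬ i > 100 then 1 else if ¬ i > 500 then 2
  else if ¬ i > 1000 then 3 else if ¬ i > 10000 then 4 else 5

-- on the 5-element threshold table, binary search computes exactly A's ladder value
theorem pvBisect_eq_bucket (i : Int) : (pvBisectLeft pvThresholds i : Int) = pvBucket i := by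
  unfold pvBisectLeft pvThresholds pvBucket
  by_cases h0 : i > 0 <;> by_cases h1 : i > 100 <;> by_cases h2 : i > 500 <;>
    by_cases h3 : i > 1000 <;> by_cases h4 : i > 10000 <;>
    first
      | omega
      | simp [pvBisectLeftGo, List.getD, h0, h1, h2, h3, h4]

-- A's foldl with accumulator acc produces acc ++ map pvBucket lst
theorem pvFold_eq (lst : List Int) (acc : List Int) :
    (lst.foldl (fun scales i =>
      if ¬ i > 0 then scales ++ [0]
      else if ¬ i > 100 then scales ++ [1]
      else if ¬ i > 500 then scales ++ [2]
      else if ¬ i > 1000 then scales ++ [3]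
      else if ¬ i > 10000 then scales ++ [4]
      else scales ++ [5]) acc) = acc ++ lst.map pvBucket := by
  induction lst generalizing acc with
  | nil => simp
  | cons x xs ih =>
    simp only [List.foldl_cons, List.map_cons, ih, pvBucket]
    split_ifs <;> simp

-- ===== VERDICT (by name: the statement is the Claim_ definition above) =====
theorem convert_to_mortality_scale_spec : Claim_equal_convert_to_mortality_scale := by
  intro lst _
  unfold Spec_convert_to_mortality_scale convert_to_mortality_scale convert_to_mortality_scale_alt
  rw [pvFold_eq]
  simp [pvBisect_eq_bucket]
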